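-- pv_equiv track=rewrite | github.com/luckkyzhou/leetcode | findSubstringsWith k-1 DistinctCharacters.py | subStringK1Characters
-- ===== SOURCE A (Python) =====
-- def subStringK1Characters(s, k):
--     res = 0
--     for left in range(len(s) - k + 1):
--         right = left + k - 1
--         visited = [0] * 27
--         count = 0
--         for i in range(left, right + 1):
--             if visited[ord(s[i]) - 97] == 0:
--                 count += 1
--             visited[ord(s[i]) - 97] += 1
--         if count == k - 1:
--             res += 1
--     return res
-- ===== SOURCE B (Python) =====
-- def subStringK1Characters(s, k):
--     n = len(s)
--     if k < 1 or k > n: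
--         return 0
--     cnt = [0] * 27
--     distinct = 0
--     for i in range(k):
--         b = (ord(s[i]) - 97) % 27
--         if cnt[b] == 0:
--             distinct += 1
--         cnt[b] += 1
--     res = 1 if distinct == k - 1 else 0
--     for right in range(k, n):
--         b = (ord(s[right]) - 97) % 27
--         if cnt[b] == 0:
--             distinct += 1
--         cnt[b] += 1
--         b2 = (ord(s[right - k]) - 97) % 27
--         cnt[b2] -= 1
--         if cnt[b2] == 0:
--             distinct -= 1
--         if distinct == k - 1:
--             res += 1
--     return res
-- ===== Notes on version B (the rewrite author's own statement) =====
-- stated objective: faster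
-- what changed: B replaces A's per-window rebuild of the 27-slot occupancy table (O(n*k)) by a single sliding window that updates the table and the distinct count incrementally as the window moves (O(n)).
import Mathlib
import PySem

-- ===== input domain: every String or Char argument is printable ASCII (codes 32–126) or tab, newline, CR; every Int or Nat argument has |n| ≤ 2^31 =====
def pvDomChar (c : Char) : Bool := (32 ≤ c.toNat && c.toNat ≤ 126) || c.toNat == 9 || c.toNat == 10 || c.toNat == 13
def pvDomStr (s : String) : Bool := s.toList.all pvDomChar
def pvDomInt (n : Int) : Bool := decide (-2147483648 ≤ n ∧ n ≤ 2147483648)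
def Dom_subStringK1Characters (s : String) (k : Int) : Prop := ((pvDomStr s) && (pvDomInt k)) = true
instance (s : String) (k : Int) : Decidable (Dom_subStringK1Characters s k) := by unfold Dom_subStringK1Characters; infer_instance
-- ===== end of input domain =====

-- B replaces A's per-window recount (O(n·k)) by a single sliding window that updates the
-- occupancy table and distinct count incrementally (O(n)); same return value on all of Pre_.

-- ===== PORT A =====
-- literal transliteration of A; the pyGetD/pySetD defaults totalize the out-of-range
-- accesses on which the Python raises IndexError — those inputs are excluded by Pre_.
def subStringK1Characters (s : String) (k : Int) : Int :=
  let cs := s.toList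
  (PySem.List.pyRange 0 ((cs.length : Int) - k + 1) 1).foldl (fun res left =>
    let right := left + k - 1
    let st := (PySem.List.pyRange left (right + 1) 1).foldl (fun (st : List Int × Int) i =>
      let idx : Int := ((PySem.List.pyGetD cs i ' ').toNat : Int) - 97
      let c' : Int := if PySem.List.pyGetD st.1 idx 0 = 0 then st.2 + 1 else st.2
      let v' := PySem.List.pySetD st.1 idx (PySem.List.pyGetD st.1 idx 0 + 1)
      (v', c')) (List.replicate 27 (0 : Int), (0 : Int))
    if st.2 = k - 1 then res + 1 else res) 0

-- ===== PORT B =====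
def subStringK1Characters_alt (s : String) (k : Int) : Int :=
  let cs := s.toList
  let n : Int := (cs.length : Int)
  if k < 1 ∨ n < k then 0 else
  let st0 := (PySem.List.pyRange 0 k 1).foldl (fun (st : List Int × Int) i =>
      let b : Int := PySem.Int.mod (((PySem.List.pyGetD cs i ' ').toNat : Int) - 97) 27
      let d' : Int := if PySem.List.pyGetD st.1 b 0 = 0 then st.2 + 1 else st.2
      (PySem.List.pySetD st.1 b (PySem.List.pyGetD st.1 b 0 + 1), d')) (List.replicate 27 (0 : Int), (0 : Int))
  let fin := (PySem.List.pyRange k n 1).foldl (fun (st : List Int × Int × Int) right =>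
      let b : Int := PySem.Int.mod (((PySem.List.pyGetD cs right ' ').toNat : Int) - 97) 27
      let d1 : Int := if PySem.List.pyGetD st.1 b 0 = 0 then st.2.1 + 1 else st.2.1
      let cnt1 := PySem.List.pySetD st.1 b (PySem.List.pyGetD st.1 b 0 + 1)
      let b2 : Int := PySem.Int.mod (((PySem.List.pyGetD cs (right - k) ' ').toNat : Int) - 97) 27
      let cnt2 := PySem.List.pySetD cnt1 b2 (PySem.List.pyGetD cnt1 b2 0 - 1)
      let d2 : Int := if PySem.List.pyGetD cnt2 b2 0 = 0 then d1 - 1 else d1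
      let r' : Int := if d2 = k - 1 then st.2.2 + 1 else st.2.2
      (cnt2, d2, r')) (st0.1, st0.2, if st0.2 = k - 1 then (1 : Int) else 0)
  fin.2.2

-- ===== PRECONDITION & SPEC =====
-- Exactly the inputs on which the Python A returns: whenever some window is inspected
-- (1 ≤ k ≤ len(s)), every character's code must lie in [70,123]; outside that band
-- visited[ord(c)-97] raises IndexError.
def Pre_subStringK1Characters (s : String) (k : Int) : Prop :=
  (1 ≤ k ∧ k ≤ (s.toList.length : Int)) →
    (s.toList.all (fun c => 70 ≤ c.toNat && c.toNat ≤ 123)) = true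

instance (s : String) (k : Int) : Decidable (Pre_subStringK1Characters s k) := by
  unfold Pre_subStringK1Characters; infer_instance

def pvWitness_subStringK1Characters : String × Int := ("abcabc", 3)

def Spec_subStringK1Characters (s : String) (k : Int) (out : Int) : Prop := out = subStringK1Characters_alt s k
instance (s : String) (k : Int) (out : Int) : Decidable (Spec_subStringK1Characters s k out) := by unfold Spec_subStringK1Characters; infer_instance

-- ===== CLAIM (what is proved, stated in full; the proofs are below) =====
def Claim_equal_subStringK1Characters : Prop := ∀ (s : String) (k : Int), Dom_subStringK1Characters s k → Pre_subStringK1Characters s k → Spec_subStringK1Characters s k (subStringK1Characters s k)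

-- ===== LEMMAS AND PROOFS =====

-- slot actually addressed by both programs: (ord c - 97) mod 27 (Python floor mod)
def slotc (c : Char) : ℕ := (c.toNat + 11) % 27
-- number of distinct slots in a window
def dsetN (w : List ℕ) : ℕ := w.toFinset.card
-- the 27-entry occupancy table of a window
def cntL (w : List ℕ) : List Int := (List.range 27).map (fun b => (w.count b : ℤ))
-- the window of length kN starting at l
def winw (sl : List ℕ) (kN l : ℕ) : List ℕ := (sl.drop l).take kN
-- indicator predicate: window at j has exactly k-1 distinct slots
def indP (sl : List ℕ) (kN : ℕ) (k : Int) (j : ℕ) : Bool := decide ((dsetN (winw sl kN j) : ℤ) = k - 1)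

theorem slotc_lt (c : Char) : slotc c < 27 := by
  unfold slotc; omega

theorem length_cntL (w : List ℕ) : (cntL w).length = 27 := by
  simp [cntL]

theorem cntL_nil : cntL [] = List.replicate 27 (0 : Int) := by
  simp [cntL]

theorem getD_cntL (w : List ℕ) (b : ℕ) (hb : b < 27) (d : Int) :
    (cntL w).getD b d = (w.count b : ℤ) := by
  simp [cntL, List.getD, List.getElem?_map, List.getElem?_range, hb]

theorem cntL_set_add (w : List ℕ) (b : ℕ) (hb : b < 27) :
    (cntL w).set b ((w.count b : ℤ) + 1) = cntL (w ++ [b]) := by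
  apply List.ext_getElem
  · simp [cntL]
  · intro i h1 h2
    simp only [cntL, List.getElem_set, List.getElem_map, List.getElem_range] at *
    have hi : i < 27 := by simpa [cntL] using h2
    by_cases hib : i = b <;> simp [hib, List.count_append, List.count_singleton] <;> omega

theorem cntL_set_tail (w : List ℕ) (b : ℕ) (hb : b < 27) :
    (cntL (b :: w)).set b (((b :: w).count b : ℤ) - 1) = cntL w := by
  apply List.ext_getElem
  · simp [cntL]
  · intro i h1 h2
    simp only [cntL, List.getElem_set, List.getElem_map, List.getElem_range] at *
    by_cases hib : i = b <;> simp [hib, List.count_cons] <;> omega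

theorem dsetN_append (w : List ℕ) (b : ℕ) :
    dsetN (w ++ [b]) = dsetN w + (if b ∈ w then 0 else 1) := by
  simp only [dsetN, List.toFinset_append, List.toFinset_cons, List.toFinset_nil]
  by_cases h : b ∈ w
  all_goals rw [Finset.union_comm, Finset.insert_union, Finset.empty_union]
  · simp [h, Finset.insert_eq_self.mpr (List.mem_toFinset.mpr h)]
  · rw [Finset.card_insert_of_notMem (by simpa using h)]
    simp [h]

theorem dsetN_cons (w : List ℕ) (b : ℕ) :
    dsetN (b :: w) = dsetN w + (if b ∈ w then 0 else 1) := by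
  simp only [dsetN, List.toFinset_cons]
  by_cases h : b ∈ w
  · simp [h, Finset.insert_eq_self.mpr (List.mem_toFinset.mpr h)]
  · rw [Finset.card_insert_of_notMem (by simpa using h)]
    simp [h]

-- B's slot expression: Python (ord c - 97) % 27 equals slotc c, for every character
theorem mod_slot (c : Char) :
    PySem.Int.mod (((c.toNat : ℤ)) - 97) 27 = ((slotc c : ℕ) : ℤ) := by
  rw [PySem.Int.mod_eq_emod_of_pos (by norm_num : (0:ℤ) < 27)]
  unfold slotc
  omega

-- A's raw index into the 27-table: under the band precondition it reads/writes slot slotc c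
theorem pyGetD_band (xs : List Int) (hx : xs.length = 27) (c : Char)
    (hc : 70 ≤ c.toNat ∧ c.toNat ≤ 123) (d : Int) :
    PySem.List.pyGetD xs ((c.toNat : ℤ) - 97) d = xs.getD (slotc c) d := by
  by_cases h97 : 97 ≤ c.toNat
  · have he : ((c.toNat : ℤ)) - 97 = ((c.toNat - 97 : ℕ) : ℤ) := by omega
    rw [he, PySem.List.pyGetD_natCast]
    congr 1
    unfold slotc; omega
  · have hk1 : 0 < 97 - c.toNat := by omega
    have hk2 : 97 - c.toNat ≤ xs.length := by omega
    have he : ((c.toNat : ℤ)) - 97 = -(((97 - c.toNat : ℕ)) : ℤ) := by omega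
    rw [he, PySem.List.pyGetD_neg_natCast _ _ _ hk1 hk2]
    rw [List.getD_eq_getElem _ _ (by unfold slotc; omega)]
    congr 1
    unfold slotc; omega

theorem pySetD_band (xs : List Int) (hx : xs.length = 27) (c : Char)
    (hc : 70 ≤ c.toNat ∧ c.toNat ≤ 123) (v : Int) :
    PySem.List.pySetD xs ((c.toNat : ℤ) - 97) v = xs.set (slotc c) v := by
  by_cases h97 : 97 ≤ c.toNat
  · have he : ((c.toNat : ℤ)) - 97 = ((c.toNat - 97 : ℕ) : ℤ) := by omega
    rw [he, PySem.List.pySetD_natCast]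
    congr 1
    unfold slotc; omega
  · have he : ((c.toNat : ℤ)) - 97 = -(((97 - c.toNat : ℕ)) : ℤ) := by omega
    rw [he]
    have hk1 : (0:ℤ) < ((97 - c.toNat : ℕ) : ℤ) := by omega
    simp only [PySem.List.pySetD, PySem.List.pySet?, PySem.List.pyIdx?, hx]
    rw [if_neg (by omega), if_pos (by omega)]
    simp only [Option.map_some, Option.getD_some]
    congr 1
    unfold slotc; omega

-- reading a range of indices yields the corresponding drop/take of the char list
theorem map_pyGetD_range (cs : List Char) (a b : ℤ) (d : Char) (h0 : 0 ≤ a)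
    (hb : b ≤ (cs.length : ℤ)) :
    (PySem.List.pyRange a b 1).map (fun i => PySem.List.pyGetD cs i d)
      = (cs.drop a.toNat).take (b - a).toNat := by
  rw [PySem.List.pyRange_one, List.map_map]
  apply List.ext_getElem
  · simp
    omega
  · intro i h1 h2
    simp only [List.getElem_map, List.getElem_range, Function.comp_apply]
    have hlen : i < (b - a).toNat := by simpa using h1
    have hblen : i < cs.length - a.toNat := by simp at h2; omega
    rw [List.getElem_take, List.getElem_drop]
    rw [PySem.List.pyGetD_eq_getElem cs d (by omega) (by push_cast; omega)]
    congr 1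
    omega

-- a fold that only counts is a countP
theorem foldl_count {Q : ℤ → Prop} [DecidablePred Q] (l : List ℤ) (r0 : ℤ) :
    l.foldl (fun r x => if Q x then r + 1 else r) r0
      = r0 + ((l.countP (fun x => decide (Q x))) : ℤ) := by
  induction l generalizing r0 with
  | nil => simp
  | cons x xs ih =>
    rw [List.foldl_cons, ih, List.countP_cons]
    by_cases h : Q x <;> simp [h] <;> ring

theorem foldl_id {α β : Type} (f : β → α → β) (l : List α) (r0 : β)
    (h : ∀ x ∈ l, ∀ r, f r x = r) : l.foldl f r0 = r0 := by
  induction l generalizing r0 with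
  | nil => rfl
  | cons x xs ih =>
    rw [List.foldl_cons, h x (by simp)]
    exact ih _ (fun y hy r => h y (by simp [hy]) r)

-- the one-character accumulation step shared by A's inner loop and B's loops
theorem step_core (w : List ℕ) (b : ℕ) (hb : b < 27) :
    (((cntL w).set b ((cntL w).getD b 0 + 1),
      if (cntL w).getD b 0 = 0 then ((dsetN w : ℤ)) + 1 else (dsetN w : ℤ)) : List Int × Int)
      = (cntL (w ++ [b]), (dsetN (w ++ [b]) : ℤ)) := by
  rw [getD_cntL _ _ hb, cntL_set_add _ _ hb, dsetN_append]
  by_cases h : b ∈ w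
  · rw [if_neg (by simpa [List.count_eq_zero] using (by exact_mod_cast (List.count_pos_iff.mpr h).ne' : ((w.count b : ℤ)) ≠ 0))]
    simp [h]
  · rw [if_pos (by exact_mod_cast congrArg (Nat.cast : ℕ → ℤ) (List.count_eq_zero.mpr h))]
    simp [h]

-- A's inner loop over a window's characters computes its table and distinct count
theorem Ainner (w : List Char) (hw : ∀ c ∈ w, 70 ≤ c.toNat ∧ c.toNat ≤ 123) :
    w.foldl (fun (st : List Int × Int) c =>
        let idx : Int := ((c.toNat : ℤ)) - 97
        let c' : Int := if PySem.List.pyGetD st.1 idx 0 = 0 then st.2 + 1 else st.2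
        let v' := PySem.List.pySetD st.1 idx (PySem.List.pyGetD st.1 idx 0 + 1)
        (v', c')) (List.replicate 27 (0 : Int), (0 : Int))
      = (cntL (w.map slotc), ((dsetN (w.map slotc) : ℕ) : ℤ)) := by
  induction w using List.reverseRecOn with
  | nil => simp [cntL_nil.symm, dsetN]
  | append_singleton w' c ih =>
    rw [List.foldl_append]
    rw [ih (fun x hx => hw x (by simp [hx]))]
    simp only [List.foldl_cons, List.foldl_nil]
    have hc := hw c (by simp)
    rw [pyGetD_band _ (length_cntL _) c hc, pySetD_band _ (length_cntL _) c hc]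
    have := step_core (w'.map slotc) (slotc c) (slotc_lt c)
    simp only [List.map_append, List.map_cons, List.map_nil]
    exact this

-- B's first loop over the first window's characters computes the same state
theorem Binit (w : List Char) :
    w.foldl (fun (st : List Int × Int) c =>
        let b : Int := PySem.Int.mod (((c.toNat : ℤ)) - 97) 27
        let d' : Int := if PySem.List.pyGetD st.1 b 0 = 0 then st.2 + 1 else st.2
        (PySem.List.pySetD st.1 b (PySem.List.pyGetD st.1 b 0 + 1), d'))
      (List.replicate 27 (0 : Int), (0 : Int))
      = (cntL (w.map slotc), ((dsetN (w.map slotc) : ℕ) : ℤ)) := by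
  induction w using List.reverseRecOn with
  | nil => simp [cntL_nil.symm, dsetN]
  | append_singleton w' c ih =>
    rw [List.foldl_append, ih]
    simp only [List.foldl_cons, List.foldl_nil, mod_slot]
    rw [PySem.List.pyGetD_natCast, PySem.List.pySetD_natCast]
    have := step_core (w'.map slotc) (slotc c) (slotc_lt c)
    simp only [List.map_append, List.map_cons, List.map_nil]
    exact this

-- the sliding identity: appending the next slot and dropping the first
theorem win_succ (sl : List ℕ) (kN m : ℕ) (hk : 1 ≤ kN) (h : kN + m < sl.length) :
    winw sl kN m ++ [sl[kN + m]] = sl[m]'(by omega) :: winw sl kN (m + 1) := by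
  obtain ⟨k', rfl⟩ : ∃ k', kN = k' + 1 := ⟨kN - 1, by omega⟩
  unfold winw
  rw [List.drop_eq_getElem_cons (by omega : m < sl.length), List.take_succ_cons]
  rw [List.cons_append]
  congr 1
  rw [List.take_add_one]
  congr 1
  have hu : k' < (sl.drop (m+1)).length := by simp; omega
  rw [List.getElem?_eq_getElem hu]
  simp [List.getElem_drop]
  congr 1
  omega

theorem foldl_funext_mem {α β : Type} (l : List α) (f g : β → α → β) (init : β)
    (h : ∀ x ∈ l, ∀ r, f r x = g r x) : l.foldl f init = l.foldl g init := by
  induction l generalizing init with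
  | nil => rfl
  | cons x xs ih =>
    rw [List.foldl_cons, List.foldl_cons, h x (by simp)]
    exact ih _ (fun y hy r => h y (by simp [hy]) r)

theorem A_eq_count (s : String) (k : Int) (h1 : 1 ≤ k) (h2 : k ≤ (s.toList.length : ℤ))
    (hband : ∀ c ∈ s.toList, 70 ≤ c.toNat ∧ c.toNat ≤ 123) :
    subStringK1Characters s k
      = ((List.range (s.toList.length - k.toNat + 1)).countP
          (indP (s.toList.map slotc) k.toNat k) : ℤ) := by
  unfold subStringK1Characters
  simp only []
  set cs := s.toList with hcs
  rw [foldl_funext_mem _ _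
    (fun (res left : ℤ) => if ((dsetN (winw (cs.map slotc) k.toNat left.toNat) : ℤ)) = k - 1
        then res + 1 else res) _ ?_]
  · rw [foldl_count (Q := fun left => ((dsetN (winw (cs.map slotc) k.toNat left.toNat) : ℤ)) = k - 1)]
    rw [PySem.List.pyRange_one, List.countP_map, zero_add]
    have hn : ((cs.length : ℤ) - k + 1 - 0).toNat = cs.length - k.toNat + 1 := by omega
    rw [hn]
    congr 1
    apply List.countP_congr
    intro j hj
    simp only [Function.comp_apply, indP]
    norm_num
  · intro left hleft r
    rw [PySem.List.mem_pyRange_one] at hleft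
    have hlk : left + k - 1 + 1 = left + k := by ring
    rw [hlk, ← List.foldl_map (f := fun i => PySem.List.pyGetD cs i ' ')
      (g := fun (st : List Int × Int) c =>
        (PySem.List.pySetD st.1 (((c : Char).toNat : ℤ) - 97)
            (PySem.List.pyGetD st.1 (((c : Char).toNat : ℤ) - 97) 0 + 1),
          if PySem.List.pyGetD st.1 (((c : Char).toNat : ℤ) - 97) 0 = 0 then st.2 + 1 else st.2))]
    rw [map_pyGetD_range cs left (left + k) ' ' hleft.1 (by omega)]
    have hwin : (left + k - left).toNat = k.toNat := by omega
    rw [hwin]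
    rw [Ainner _ (fun c hc => hband c (List.mem_of_mem_drop (List.mem_of_mem_take hc)))]
    simp only [winw, List.map_take, List.map_drop]
    rfl

theorem Bslide (cs : List Char) (k : Int) (h1 : 1 ≤ k) (h2 : k ≤ (cs.length : ℤ))
    (m : ℕ) (hm : m ≤ cs.length - k.toNat) (r0 : ℤ) :
    (PySem.List.pyRange k (k + (m : ℤ)) 1).foldl (fun (st : List Int × Int × Int) right =>
      let b : Int := PySem.Int.mod (((PySem.List.pyGetD cs right ' ').toNat : Int) - 97) 27
      let d1 : Int := if PySem.List.pyGetD st.1 b 0 = 0 then st.2.1 + 1 else st.2.1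
      let cnt1 := PySem.List.pySetD st.1 b (PySem.List.pyGetD st.1 b 0 + 1)
      let b2 : Int := PySem.Int.mod (((PySem.List.pyGetD cs (right - k) ' ').toNat : Int) - 97) 27
      let cnt2 := PySem.List.pySetD cnt1 b2 (PySem.List.pyGetD cnt1 b2 0 - 1)
      let d2 : Int := if PySem.List.pyGetD cnt2 b2 0 = 0 then d1 - 1 else d1
      let r' : Int := if d2 = k - 1 then st.2.2 + 1 else st.2.2
      (cnt2, d2, r'))
      (cntL (winw (cs.map slotc) k.toNat 0), ((dsetN (winw (cs.map slotc) k.toNat 0) : ℕ) : ℤ), r0)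
    = (cntL (winw (cs.map slotc) k.toNat m), ((dsetN (winw (cs.map slotc) k.toNat m) : ℕ) : ℤ),
       r0 + ((List.range m).countP (fun j => indP (cs.map slotc) k.toNat k (j + 1)) : ℤ)) := by
  induction m with
  | zero => simp [PySem.List.pyRange_one_eq_nil]
  | succ m ih =>
    have hm' : m ≤ cs.length - k.toNat := by omega
    have hcast : (k + ((m + 1 : ℕ) : ℤ)) = (k + (m : ℤ)) + 1 := by push_cast; ring
    rw [hcast, PySem.List.pyRange_one_succ_right (by omega), List.foldl_append, ih hm']
    simp only [List.foldl_cons, List.foldl_nil]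
    set sl := cs.map slotc with hsl
    have hlen : sl.length = cs.length := by simp [hsl]
    have hin : k.toNat + m < cs.length := by omega
    have hmlt : m < cs.length := by omega
    -- the incoming character
    have hidx1 : (k + (m : ℤ)) = ((k.toNat + m : ℕ) : ℤ) := by omega
    have hg1 : PySem.List.pyGetD cs (k + (m : ℤ)) ' ' = cs[k.toNat + m] := by
      rw [hidx1, PySem.List.pyGetD_natCast, List.getD_eq_getElem _ _ hin]
    -- the outgoing character
    have hidx2 : (k + (m : ℤ) - k) = ((m : ℕ) : ℤ) := by omega
    have hg2 : PySem.List.pyGetD cs (k + (m : ℤ) - k) ' ' = cs[m] := by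
      rw [hidx2, PySem.List.pyGetD_natCast, List.getD_eq_getElem _ _ hmlt]
    rw [hg1, hg2, mod_slot, mod_slot]
    set wm := winw sl k.toNat m with hwm
    set a := slotc cs[k.toNat + m] with ha
    set a2 := slotc cs[m] with ha2
    have haeq : a = sl[k.toNat + m]'(by omega) := by simp [ha, hsl]
    have ha2eq : a2 = sl[m]'(by omega) := by simp [ha2, hsl]
    have hwinsucc : wm ++ [a] = a2 :: winw sl k.toNat (m + 1) := by
      rw [haeq, ha2eq, hwm]
      exact win_succ sl k.toNat m (by omega) (by omega)
    simp only [PySem.List.pyGetD_natCast, PySem.List.pySetD_natCast, Int.toNat_natCast]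
    rw [getD_cntL _ _ (slotc_lt _), cntL_set_add _ _ (slotc_lt _), hwinsucc,
        getD_cntL _ _ (slotc_lt _), cntL_set_tail _ _ (slotc_lt _),
        getD_cntL _ _ (slotc_lt _)]
    set w' := winw sl k.toNat (m + 1) with hw'
    have hd1 : (if ((wm.count a : ℤ)) = 0 then ((dsetN wm : ℤ)) + 1 else ((dsetN wm : ℤ)))
        = ((dsetN (a2 :: w') : ℤ)) := by
      rw [← hwinsucc, dsetN_append]
      by_cases h : a ∈ wm
      · have hc0 : wm.count a ≠ 0 := by simp [List.count_eq_zero, h]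
        rw [if_neg (by exact_mod_cast hc0)]
        simp [h]
      · rw [if_pos (by exact_mod_cast congrArg (Nat.cast : ℕ → ℤ) (List.count_eq_zero.mpr h))]
        simp [h]
    rw [hd1]
    have hd2 : (if ((w'.count a2 : ℤ)) = 0 then ((dsetN (a2 :: w') : ℤ)) - 1
          else ((dsetN (a2 :: w') : ℤ))) = ((dsetN w' : ℤ)) := by
      by_cases h : a2 ∈ w'
      · have : w'.count a2 ≠ 0 := by simp [List.count_eq_zero, h]
        rw [if_neg (by exact_mod_cast this)]
        rw [dsetN_cons]; simp [h]
      · rw [if_pos (by exact_mod_cast congrArg (Nat.cast : ℕ → ℤ) (List.count_eq_zero.mpr h))]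
        rw [dsetN_cons]; simp [h]
    rw [hd2]
    simp only [Prod.mk.injEq, true_and]
    rw [List.range_succ, List.countP_append]
    by_cases h : ((dsetN w' : ℤ)) = k - 1
    · rw [if_pos h]
      have hi : indP sl k.toNat k (m + 1) = true := by
        simp only [indP, decide_eq_true_eq]; exact h
      simp [hi]
      ring
    · rw [if_neg h]
      have hi : indP sl k.toNat k (m + 1) = false := by
        simp only [indP, decide_eq_false_iff_not]; exact h
      simp [hi]

theorem B_eq_count (s : String) (k : Int) (h1 : 1 ≤ k) (h2 : k ≤ (s.toList.length : ℤ)) :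
    subStringK1Characters_alt s k
      = ((List.range (s.toList.length - k.toNat + 1)).countP
          (indP (s.toList.map slotc) k.toNat k) : ℤ) := by
  unfold subStringK1Characters_alt
  simp only []
  set cs := s.toList with hcs
  rw [if_neg (by rw [not_or]; exact ⟨by omega, by omega⟩)]
  rw [← List.foldl_map (f := fun i => PySem.List.pyGetD cs i ' ')
      (g := fun (st : List Int × Int) c =>
        (PySem.List.pySetD st.1 (PySem.Int.mod ((((c : Char).toNat : ℤ)) - 97) 27)
            (PySem.List.pyGetD st.1 (PySem.Int.mod ((((c : Char).toNat : ℤ)) - 97) 27) 0 + 1),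
          if PySem.List.pyGetD st.1 (PySem.Int.mod ((((c : Char).toNat : ℤ)) - 97) 27) 0 = 0
            then st.2 + 1 else st.2))]
  have h00 : PySem.List.pyRange 0 k 1 = PySem.List.pyRange (0 : ℤ) k 1 := rfl
  rw [map_pyGetD_range cs 0 k ' ' le_rfl (by omega)]
  have htake : (List.take (k - 0).toNat (List.drop (0:ℤ).toNat cs)) = cs.take k.toNat := by
    simp
  rw [htake, Binit]
  have hw0 : (cs.take k.toNat).map slotc = winw (cs.map slotc) k.toNat 0 := by
    simp [winw, List.map_take]
  rw [hw0]
  have hncast : (cs.length : ℤ) = k + ((cs.length - k.toNat : ℕ) : ℤ) := by omega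
  rw [hncast, Bslide cs k h1 h2 (cs.length - k.toNat) le_rfl]
  set M := cs.length - k.toNat with hM
  rw [List.range_succ_eq_map, List.countP_cons, List.countP_map]
  have hpe : (indP (cs.map slotc) k.toNat k ∘ Nat.succ)
      = fun j => indP (cs.map slotc) k.toNat k (j + 1) := rfl
  rw [hpe]
  by_cases h0 : ((dsetN (winw (cs.map slotc) k.toNat 0) : ℤ)) = k - 1
  · have : indP (cs.map slotc) k.toNat k 0 = true := by
      simp only [indP, decide_eq_true_eq]; exact h0
    simp [this, h0]
    push_cast; ring
  · have : indP (cs.map slotc) k.toNat k 0 = false := by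
      simp only [indP, decide_eq_false_iff_not]; exact h0
    simp [this, h0]

-- A and B agree on every input admitted by Pre_
theorem AB_eq : ∀ (s : String) (k : Int), Pre_subStringK1Characters s k →
    subStringK1Characters s k = subStringK1Characters_alt s k := by
  intro s k hpre
  by_cases hk1 : k < 1
  · conv_rhs => rw [subStringK1Characters_alt]
    simp only []
    rw [if_pos (Or.inl hk1)]
    unfold subStringK1Characters
    simp only []
    refine foldl_id _ _ _ ?_
    intro x hx r
    have hr : x + k - 1 + 1 = x + k := by ring
    rw [hr, PySem.List.pyRange_one_eq_nil (by omega), List.foldl_nil]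
    rw [if_neg (by omega)]
  · by_cases hk2 : (s.toList.length : ℤ) < k
    · conv_rhs => rw [subStringK1Characters_alt]
      simp only []
      rw [if_pos (Or.inr hk2)]
      unfold subStringK1Characters
      simp only []
      rw [PySem.List.pyRange_one_eq_nil (by omega), List.foldl_nil]
    · have h1 : 1 ≤ k := by omega
      have h2 : k ≤ (s.toList.length : ℤ) := by omega
      have hband : ∀ c ∈ s.toList, 70 ≤ c.toNat ∧ c.toNat ≤ 123 := by
        intro c hc
        have := List.all_eq_true.mp (hpre ⟨h1, h2⟩) c hc
        simpa using this
      rw [A_eq_count s k h1 h2 hband, B_eq_count s k h1 h2]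

-- ===== VERDICT (by name: the statement is the Claim_ definition above) =====
theorem subStringK1Characters_spec : Claim_equal_subStringK1Characters := by
  intro s k _hdom hpre
  unfold Spec_subStringK1Characters
  exact AB_eq s k hpre
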